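-- pv_equiv track=rewrite | github.com/ahnhongjo/CodingTest | 코딩테스트_파이썬/level3/숫자 게임.py | solution
-- ===== SOURCE A (Python) =====
-- def solution(A, B):
--     A.sort()
--     B.sort()
--
--     for i in range(len(A)):
--         while A[i] >= B[i]:
--             if B[i] == 0:
--                 return i
--             B = B[:i] + B[i + 1:]
--             B.append(0)
--
--     answer = len(B)
--     return answer
-- ===== SOURCE B (Python) =====
-- def solution(A, B):
--     # Two-pointer sweep over the sorted lists instead of repeated list slicing.
--     a = sorted(A)
--     b = sorted(B)
--     m = len(b)
--     j = 0
--     for i, x in enumerate(a):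
--         while True:
--             cur = b[j] if j < m else 0
--             if x >= cur:
--                 if cur == 0:
--                     return i
--                 j += 1
--             else:
--                 if j < m:
--                     j += 1
--                 break
--     return m
-- ===== Notes on version B (the rewrite author's own statement) =====
-- stated objective: faster
-- what changed: A repeatedly rebuilds B via slicing (B = B[:i] + B[i+1:]; B.append(0)) inside a nested loop; B replaces this by a single two-pointer sweep over the two sorted lists, keeping just an index into sorted(B) instead of mutating the list.
-- outside the precondition, e.g. on solution([5, 5], [1]): A returns 0, B returns 0
import Mathlib
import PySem

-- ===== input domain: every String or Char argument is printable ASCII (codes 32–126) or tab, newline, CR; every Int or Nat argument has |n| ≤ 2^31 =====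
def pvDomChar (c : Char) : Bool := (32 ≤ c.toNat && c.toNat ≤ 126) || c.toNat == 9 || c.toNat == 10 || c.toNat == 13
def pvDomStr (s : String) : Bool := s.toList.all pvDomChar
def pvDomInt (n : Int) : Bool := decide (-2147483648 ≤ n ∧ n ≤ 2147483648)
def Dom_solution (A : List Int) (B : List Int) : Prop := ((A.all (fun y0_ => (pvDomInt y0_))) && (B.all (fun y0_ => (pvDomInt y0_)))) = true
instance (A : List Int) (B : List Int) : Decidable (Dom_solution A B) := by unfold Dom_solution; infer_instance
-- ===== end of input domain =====

-- B replaces A's quadratic rebuild-the-list loop (B = B[:i] + B[i+1:]; B.append(0)) by a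
-- single two-pointer sweep over the sorted lists; equivalence is about the RETURN value only
-- (Python A sorts both of its arguments in place).

-- ===== PORT A =====
-- termination helper for A's inner while loop: removing the (nonzero) element B[i] and
-- appending 0 strictly decreases the number of nonzero elements.
theorem pvA_filter_decr (L : List Int) (i : Nat) (bi : Int)
    (h : PySem.List.pyGet? L (i : Int) = some bi) (hbi : ¬ bi = 0) :
    (((PySem.List.slice L none (some (i : Int)) ++ PySem.List.slice L (some ((i : Int) + 1)) none) ++ [0]).filter (· != 0)).length
      < (L.filter (· != 0)).length := by
  rw [PySem.List.pyGet?_natCast] at h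
  have hi : i < L.length := by
    by_contra hc
    simp [List.getElem?_eq_none (by omega : L.length ≤ i)] at h
  have hL : L = L.take i ++ L[i] :: L.drop (i + 1) := by
    conv_lhs => rw [← List.take_append_drop i L, List.drop_eq_getElem_cons hi]
  have hbi' : L[i] = bi := by
    have := List.getElem?_eq_getElem hi
    rw [this] at h; exact Option.some.inj h
  have h1 : PySem.List.slice L none (some (i : Int)) = L.take i := PySem.List.slice_to_natCast ..
  have h2 : PySem.List.slice L (some ((i : Int) + 1)) none = L.drop (i + 1) := by
    have : ((i : Int) + 1) = ((i + 1 : Nat) : Int) := by push_cast; ring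
    rw [this, PySem.List.slice_from_natCast]
  rw [h1, h2]
  conv_rhs => rw [hL]
  simp [List.filter_append, hbi', hbi]

def pvAInner (ai : Int) (L : List Int) (i : Nat) : Sum Int (List Int) :=
  -- 'while A[i] >= B[i]: if B[i] == 0: return i; B = B[:i] + B[i+1:]; B.append(0)'
  match h : PySem.List.pyGet? L (i : Int) with
  | none => Sum.inl 0     -- IndexError in Python; outside Pre_solution
  | some bi =>
    if ai ≥ bi then
      if hz : bi = 0 then Sum.inl (i : Int)
      else pvAInner ai ((PySem.List.slice L none (some (i : Int)) ++ PySem.List.slice L (some ((i : Int) + 1)) none) ++ [0]) i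
    else Sum.inr L
termination_by (L.filter (· != 0)).length
decreasing_by exact pvA_filter_decr L i bi h hz

def pvAOuter (a : List Int) (b : List Int) (i : Nat) : Int :=
  -- 'for i in range(len(A)): …' then 'answer = len(B); return answer'
  if h : i < a.length then
    match pvAInner (PySem.List.pyGetD a (i : Int) 0) b i with
    | Sum.inl r => r
    | Sum.inr b' => pvAOuter a b' (i + 1)
  else (b.length : Int)
termination_by a.length - i

def solution (A : List Int) (B : List Int) : Int :=
  pvAOuter (PySem.List.sorted A (fun x => x) false) (PySem.List.sorted B (fun x => x) false) 0

-- ===== PORT B =====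
def pvBInner (x : Int) (b : List Int) (m i j : Nat) : Sum Int Nat :=
  -- 'while True: cur = b[j] if j < m else 0; …'
  if hj : j < m then
    let cur := b.getD j 0
    if x ≥ cur then
      if cur = 0 then Sum.inl (i : Int)
      else pvBInner x b m i (j + 1)
    else Sum.inr (j + 1)
  else
    if x ≥ (0 : Int) then Sum.inl (i : Int) else Sum.inr j
termination_by m - j

def pvBOuter (b : List Int) (m : Nat) : List Int → Nat → Nat → Int
  | [], _, _ => (m : Int)
  | x :: rest, i, j =>
    match pvBInner x b m i j with
    | Sum.inl r => r
    | Sum.inr j' => pvBOuter b m rest (i + 1) j'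

def solution_alt (A : List Int) (B : List Int) : Int :=
  let a := PySem.List.sorted A (fun x => x) false
  let b := PySem.List.sorted B (fun x => x) false
  pvBOuter b b.length a 0 0

-- ===== PRECONDITION & SPEC =====
-- Pre_ excludes len(A) > len(B): there Python A in general raises IndexError on B[i]
-- (it can also return early on a few such inputs before the index runs out of B).
def Pre_solution (A : List Int) (B : List Int) : Prop := A.length ≤ B.length
instance (A : List Int) (B : List Int) : Decidable (Pre_solution A B) := by unfold Pre_solution; infer_instance
def pvWitness_solution : List Int × List Int := ([1, 3], [2, 4])

def Spec_solution (A : List Int) (B : List Int) (out : Int) : Prop := out = solution_alt A B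
instance (A : List Int) (B : List Int) (out : Int) : Decidable (Spec_solution A B out) := by unfold Spec_solution; infer_instance

-- ===== CLAIM (what is proved, stated in full; the proofs are below) =====
def Claim_equal_solution : Prop := ∀ (A : List Int) (B : List Int), Dom_solution A B → Pre_solution A B → Spec_solution A B (solution A B)

-- ===== LEMMAS AND PROOFS =====

-- Bisimulation of the inner loops: A's list state is always
-- kept ++ (b.drop j ++ replicate (j - i) 0), where 'kept' holds the i elements already fixed
-- at positions < i, b.drop j is the not-yet-consumed part of the sorted B, and the zeros are
-- the sentinels A appended.

theorem pv_take_at (k : List Int) (c : Int) (M : List Int) :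
    (k ++ c :: M).take k.length = k := by
  induction k with
  | nil => rfl
  | cons a t ih => simpa using ih

theorem pv_drop_at (k : List Int) (c : Int) (M : List Int) :
    (k ++ c :: M).drop (k.length + 1) = M := by
  induction k with
  | nil => rfl
  | cons a t ih => simpa using ih

theorem pvAInner_step (ai : Int) (L : List Int) (i : Nat) (bi : Int)
    (h : PySem.List.pyGet? L (i : Int) = some bi) :
    pvAInner ai L i =
      if ai ≥ bi then
        if bi = 0 then Sum.inl (i : Int)
        else pvAInner ai ((PySem.List.slice L none (some (i : Int)) ++ PySem.List.slice L (some ((i : Int) + 1)) none) ++ [0]) i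
      else Sum.inr L := by
  rw [pvAInner]
  split
  · next h' => rw [h] at h'; exact absurd h' (by simp)
  · next bi' h' => rw [h] at h'; cases h'; rfl

theorem pvBOuter_nil (b : List Int) (m i j : Nat) : pvBOuter b m [] i j = (m : Int) := rfl

theorem pvBOuter_cons (b : List Int) (m : Nat) (x : Int) (rest : List Int) (i j : Nat) :
    pvBOuter b m (x :: rest) i j =
      match pvBInner x b m i j with
      | Sum.inl r => r
      | Sum.inr j' => pvBOuter b m rest (i + 1) j' := rfl

theorem pv_inner_corr (x : Int) (b : List Int) :
    ∀ d j (k : List Int), b.length - j < d → k.length ≤ j → j ≤ b.length → k.length < b.length →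
      (∃ r, pvBInner x b b.length k.length j = Sum.inl r ∧
            pvAInner x (k ++ (b.drop j ++ List.replicate (j - k.length) 0)) k.length = Sum.inl r)
      ∨ (∃ j' c, pvBInner x b b.length k.length j = Sum.inr j' ∧ k.length + 1 ≤ j' ∧ j' ≤ b.length ∧
            pvAInner x (k ++ (b.drop j ++ List.replicate (j - k.length) 0)) k.length
              = Sum.inr ((k ++ [c]) ++ (b.drop j' ++ List.replicate (j' - (k.length + 1)) 0))) := by
  intro d
  induction d with
  | zero => intro j k hd hij hjb hib; omega
  | succ d ih =>
    intro j k hd hij hjb hib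
    by_cases hj : j < b.length
    · -- the element at position k.length of A's list is the real b[j]
      have hdrop : b.drop j = b[j] :: b.drop (j + 1) := List.drop_eq_getElem_cons hj
      have hsh : k ++ (b.drop j ++ List.replicate (j - k.length) (0 : Int))
          = k ++ b[j] :: (b.drop (j + 1) ++ List.replicate (j - k.length) 0) := by
        rw [hdrop, List.cons_append]
      have hget : PySem.List.pyGet? (k ++ (b.drop j ++ List.replicate (j - k.length) 0)) (k.length : Int)
          = some b[j] := by
        rw [hsh]; exact PySem.List.pyGet?_append_length ..
      have hcur : b.getD j 0 = b[j] := List.getD_eq_getElem b 0 hj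
      rw [pvAInner_step x _ k.length b[j] hget, pvBInner, dif_pos hj, hcur]
      by_cases hge : x ≥ b[j]
      · rw [if_pos hge, if_pos hge]
        by_cases hz : b[j] = 0
        · rw [if_pos hz, if_pos hz]
          exact Or.inl ⟨(k.length : Int), rfl, rfl⟩
        · rw [if_neg hz, if_neg hz]
          -- the discarded b[j] disappears, one sentinel 0 is appended
          have hL' : (PySem.List.slice (k ++ (b.drop j ++ List.replicate (j - k.length) 0)) none (some (k.length : Int))
                ++ PySem.List.slice (k ++ (b.drop j ++ List.replicate (j - k.length) 0)) (some ((k.length : Int) + 1)) none) ++ [0]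
              = k ++ (b.drop (j + 1) ++ List.replicate (j + 1 - k.length) 0) := by
            rw [PySem.List.slice_to_natCast,
              show ((k.length : Int) + 1) = ((k.length + 1 : Nat) : Int) by push_cast; ring,
              PySem.List.slice_from_natCast, hsh, pv_take_at, pv_drop_at,
              show j + 1 - k.length = (j - k.length) + 1 by omega, List.replicate_succ']
            simp
          rw [hL']
          exact ih (j + 1) k (by omega) (by omega) (by omega) hib
      · rw [if_neg hge, if_neg hge]
        refine Or.inr ⟨j + 1, b[j], rfl, by omega, by omega, ?_⟩
        rw [hsh, show j + 1 - (k.length + 1) = j - k.length by omega]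
        simp
    · -- j = b.length: only sentinel zeros remain at positions ≥ k.length
      have hdrop : b.drop j = ([] : List Int) := List.drop_of_length_le (by omega)
      have hsh : k ++ (b.drop j ++ List.replicate (j - k.length) (0 : Int))
          = k ++ (0 : Int) :: List.replicate (j - k.length - 1) 0 := by
        rw [hdrop, show j - k.length = (j - k.length - 1) + 1 by omega]
        simp [List.replicate_succ]
      have hget : PySem.List.pyGet? (k ++ (b.drop j ++ List.replicate (j - k.length) 0)) (k.length : Int)
          = some 0 := by
        rw [hsh]; exact PySem.List.pyGet?_append_length ..
      rw [pvAInner_step x _ k.length 0 hget, pvBInner, dif_neg hj]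
      by_cases hge : x ≥ (0 : Int)
      · rw [if_pos hge, if_pos hge, if_pos rfl]
        exact Or.inl ⟨(k.length : Int), rfl, rfl⟩
      · rw [if_neg hge, if_neg hge]
        refine Or.inr ⟨j, 0, rfl, by omega, by omega, ?_⟩
        rw [hsh, hdrop, show j - (k.length + 1) = j - k.length - 1 by omega]
        simp

theorem pv_outer_corr (a b : List Int) :
    ∀ d j (k : List Int), a.length - k.length ≤ d → k.length ≤ j → j ≤ b.length → a.length ≤ b.length →
      pvAOuter a (k ++ (b.drop j ++ List.replicate (j - k.length) 0)) k.length
        = pvBOuter b b.length (a.drop k.length) k.length j := by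
  intro d
  induction d with
  | zero =>
    intro j k hd hij hjb hab
    have hi : ¬ k.length < a.length := by omega
    have hda : a.drop k.length = [] := List.drop_of_length_le (by omega)
    rw [pvAOuter, dif_neg hi, hda, pvBOuter_nil]
    simp
    omega
  | succ d ih =>
    intro j k hd hij hjb hab
    by_cases hi : k.length < a.length
    · have hib : k.length < b.length := by omega
      have hai : PySem.List.pyGetD a (k.length : Int) 0 = a[k.length] := by
        rw [PySem.List.pyGetD_natCast]
        exact List.getD_eq_getElem a 0 hi
      rw [pvAOuter, dif_pos hi, hai, List.drop_eq_getElem_cons hi, pvBOuter_cons]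
      rcases pv_inner_corr a[k.length] b (b.length - j + 1) j k (by omega) hij hjb hib with
        ⟨r, hB, hA⟩ | ⟨j', c, hB, hij', hj'b, hA⟩
      · rw [hA, hB]
      · rw [hA, hB]
        have := ih j' (k ++ [c]) (by simp; omega) (by simpa using hij') hj'b hab
        simpa using this
    · have hda : a.drop k.length = [] := List.drop_of_length_le (by omega)
      rw [pvAOuter, dif_neg hi, hda, pvBOuter_nil]
      simp
      omega

-- ===== VERDICT (by name: the statement is the Claim_ definition above) =====
theorem solution_spec : Claim_equal_solution := by
  intro A B _hD hPre
  unfold Spec_solution solution solution_alt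
  have hlen : (PySem.List.sorted A (fun x => x) false).length ≤ (PySem.List.sorted B (fun x => x) false).length := by
    rw [PySem.List.length_sorted, PySem.List.length_sorted]; exact hPre
  have := pv_outer_corr (PySem.List.sorted A (fun x => x) false) (PySem.List.sorted B (fun x => x) false)
      (PySem.List.sorted A (fun x => x) false).length 0 [] (by omega) (Nat.zero_le 0) (Nat.zero_le _) hlen
  simpa using this
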